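-- pv_equiv track=rewrite | github.com/gonzalezguerra/IIC2233 | Tareas/T0/functions.py | verificar_tortugas
-- ===== SOURCE A (Python) =====
-- def agrandar_tablero(tablero: list) -> list:
--     size_tablero = len(tablero)
--     size_nuevo = size_tablero + 2
--     tablero_nuevo = [['-' for i in range(size_nuevo)] for i in range(size_nuevo)]
--     for j in range(size_tablero):
--         for k in range(size_tablero):
--             tablero_nuevo[j + 1][k + 1] = tablero[j][k]
--     return tablero_nuevo
--
-- def verificar_tortugas(tablero: list) -> int:
--     tortugas_mal_colocadas = 0
--     tablero_ampliado = agrandar_tablero(tablero)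
--     for i in range(len(tablero)):
--         for j in range(len(tablero)):
--             tortugas_cerca = False
--             if tablero[i][j] == "T":
--                 if (i >= 0) and (i <= len(tablero)):
--                     if (tablero_ampliado[i][j + 1] == "T") or (tablero_ampliado[i + 1][j] == "T"):
--                         tortugas_cerca = True
--                 if (j >= 0) and (j <= len(tablero)):
--                     if (tablero_ampliado[i + 1][j] == "T") or (tablero_ampliado[i + 1][j] == "T"):
--                         tortugas_cerca = True
--             if tortugas_cerca:
--                 tortugas_mal_colocadas += 1
--     return tortugas_mal_colocadas
-- ===== SOURCE B (Python) =====
-- def verificar_tortugas(tablero: list) -> int: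
--     # Inclusion-exclusion over adjacent "TT" pairs: a cell is miscounted iff it is
--     # the lower cell of a vertical TT pair or the right cell of a horizontal TT
--     # pair, so the answer is vert + horiz - both (cells that are both at once).
--     n = len(tablero)
--     vert = sum(1 for i in range(1, n) for j in range(n)
--                if tablero[i][j] == "T" and tablero[i - 1][j] == "T")
--     horiz = sum(1 for i in range(n) for j in range(1, n)
--                 if tablero[i][j] == "T" and tablero[i][j - 1] == "T")
--     both = sum(1 for i in range(1, n) for j in range(1, n)
--                if tablero[i][j] == "T" and tablero[i - 1][j] == "T"
--                and tablero[i][j - 1] == "T")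
--     return vert + horiz - both
-- ===== Notes on version B (the rewrite author's own statement) =====
-- stated objective: alternative
-- what changed: Replaces A's build-a-padded-copy-then-test-every-cell's-neighbors scan by inclusion-exclusion over adjacent TT pairs: three independent passes count vertical TT pairs, horizontal TT pairs and their overlap, and the answer is vert + horiz - both.
import Mathlib
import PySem

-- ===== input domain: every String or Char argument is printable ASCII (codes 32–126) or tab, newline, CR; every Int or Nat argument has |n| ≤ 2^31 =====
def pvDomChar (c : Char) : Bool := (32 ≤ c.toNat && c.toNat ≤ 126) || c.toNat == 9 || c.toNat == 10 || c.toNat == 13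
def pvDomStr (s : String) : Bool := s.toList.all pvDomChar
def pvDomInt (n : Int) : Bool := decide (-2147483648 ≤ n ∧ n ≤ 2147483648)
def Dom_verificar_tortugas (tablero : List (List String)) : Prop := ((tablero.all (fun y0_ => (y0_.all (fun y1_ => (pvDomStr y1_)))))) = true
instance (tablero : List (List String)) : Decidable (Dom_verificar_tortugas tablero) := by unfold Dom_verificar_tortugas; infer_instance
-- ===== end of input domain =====

-- B replaces A's padded-copy-then-neighbor-scan by inclusion-exclusion over
-- adjacent TT pairs (vertical + horizontal - overlap), in three passes
-- (objective: alternative).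

-- ===== PORT A =====
-- indices used by the Python are always in range under Pre_, so getD/set are exact there
def agrandar_tablero (tablero : List (List String)) : List (List String) :=
  let size_tablero := tablero.length
  let size_nuevo := size_tablero + 2
  let tablero_nuevo := List.replicate size_nuevo (List.replicate size_nuevo "-")
  (List.range size_tablero).foldl (fun acc j =>
    (List.range size_tablero).foldl (fun acc2 k =>
      acc2.set (j+1) ((acc2.getD (j+1) []).set (k+1) ((tablero.getD j []).getD k ""))) acc)
    tablero_nuevo

def verificar_tortugas (tablero : List (List String)) : Int :=
  let tablero_ampliado := agrandar_tablero tablero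
  let n := tablero.length
  (List.range n).foldl (fun acc i =>
    (List.range n).foldl (fun acc2 j =>
      let tortugas_cerca := false
      let tortugas_cerca :=
        if (tablero.getD i []).getD j "" == "T" then
          let c1 := if decide (0 ≤ i) && decide (i ≤ n) then
              (if ((tablero_ampliado.getD i []).getD (j+1) "" == "T")
                  || ((tablero_ampliado.getD (i+1) []).getD j "" == "T") then true else tortugas_cerca)
            else tortugas_cerca
          let c2 := if decide (0 ≤ j) && decide (j ≤ n) then
              (if ((tablero_ampliado.getD (i+1) []).getD j "" == "T")
                  || ((tablero_ampliado.getD (i+1) []).getD j "" == "T") then true else c1)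
            else c1
          c2
        else tortugas_cerca
      if tortugas_cerca then acc2 + 1 else acc2) acc) 0

-- ===== PORT B =====
-- Python ranges range(1, n) / range(n) are Nat ranges here; all indices are in
-- range under Pre_, so getD with default "" is exact there.
def verificar_tortugas_alt (tablero : List (List String)) : Int :=
  let n := tablero.length
  let vert := (List.range' 1 (n-1)).foldl (fun acc i =>
    (List.range n).foldl (fun a j =>
      if ((tablero.getD i []).getD j "" == "T") && ((tablero.getD (i-1) []).getD j "" == "T")
      then a + 1 else a) acc) (0 : Int)
  let horiz := (List.range n).foldl (fun acc i =>
    (List.range' 1 (n-1)).foldl (fun a j =>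
      if ((tablero.getD i []).getD j "" == "T") && ((tablero.getD i []).getD (j-1) "" == "T")
      then a + 1 else a) acc) (0 : Int)
  let both := (List.range' 1 (n-1)).foldl (fun acc i =>
    (List.range' 1 (n-1)).foldl (fun a j =>
      if ((tablero.getD i []).getD j "" == "T") && ((tablero.getD (i-1) []).getD j "" == "T")
         && ((tablero.getD i []).getD (j-1) "" == "T")
      then a + 1 else a) acc) (0 : Int)
  vert + horiz - both

-- ===== PRECONDITION & SPEC =====
-- Pre_ excludes exactly the inputs on which the Python A raises IndexError:
-- boards containing a row shorter than the number of rows.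
def Pre_verificar_tortugas (tablero : List (List String)) : Prop :=
  ∀ fila ∈ tablero, tablero.length ≤ fila.length
instance (tablero : List (List String)) : Decidable (Pre_verificar_tortugas tablero) := by
  unfold Pre_verificar_tortugas; infer_instance
def pvWitness_verificar_tortugas : List (List String) := [["T", "-"], ["T", "T"]]

def Spec_verificar_tortugas (tablero : List (List String)) (out : Int) : Prop := out = verificar_tortugas_alt tablero
instance (tablero : List (List String)) (out : Int) : Decidable (Spec_verificar_tortugas tablero out) := by unfold Spec_verificar_tortugas; infer_instance

-- ===== CLAIM (what is proved, stated in full; the proofs are below) =====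
def Claim_equal_verificar_tortugas : Prop := ∀ (tablero : List (List String)), Dom_verificar_tortugas tablero → Pre_verificar_tortugas tablero → Spec_verificar_tortugas tablero (verificar_tortugas tablero)

-- ===== LEMMAS AND PROOFS =====

-- the cell at (i, j), "" when out of range
def vtGet (t : List (List String)) (i j : Nat) : String := (t.getD i []).getD j ""

-- "cell (i,j) is a T with a T above or to the left"
def vtBad (t : List (List String)) (i j : Nat) : Bool :=
  (vtGet t i j == "T") &&
    ((decide (0 < i) && (vtGet t (i-1) j == "T")) || (decide (0 < j) && (vtGet t i (j-1) == "T")))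

-- the common reference count both ports are reduced to
def vtSpec (t : List (List String)) : Int :=
  (List.range t.length).foldl (fun acc i =>
    (List.range t.length).foldl (fun acc2 j => if vtBad t i j then acc2 + 1 else acc2) acc) 0

-- getD after a single set
theorem vt_getD_set {α : Type} (L : List α) (i b : Nat) (v d : α) :
    (L.set i v).getD b d = if b = i ∧ i < L.length then v else L.getD b d := by
  by_cases h2 : i < L.length
  · by_cases hb : b = i
    · subst hb
      rw [if_pos ⟨rfl, h2⟩]
      simp [List.getD_eq_getElem?_getD, List.getElem?_set_self h2]
    · rw [if_neg (by tauto)]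
      simp [List.getD_eq_getElem?_getD, List.getElem?_set_ne (fun hc => hb hc.symm)]
  · rw [if_neg (by tauto), List.set_eq_of_length_le (by omega)]

-- the row-update loop of agrandar_tablero, and its characterisation
theorem vt_row_len (t : List (List String)) (j : Nat) (l : List Nat) :
    ∀ r : List String,
      (l.foldl (fun r k => r.set (k+1) ((t.getD j []).getD k "")) r).length = r.length := by
  induction l with
  | nil => intro r; rfl
  | cons x xs ih =>
      intro r
      rw [List.foldl_cons, ih, List.length_set]

theorem vt_row_getD (t : List (List String)) (j : Nat) :
    ∀ (m : Nat) (r : List String) (b : Nat),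
      ((List.range m).foldl (fun r k => r.set (k+1) ((t.getD j []).getD k "")) r).getD b "" =
        if 1 ≤ b ∧ b ≤ m ∧ b < r.length then (t.getD j []).getD (b-1) "" else r.getD b "" := by
  intro m
  induction m with
  | zero =>
      intro r b
      rw [List.range_zero, List.foldl_nil, if_neg (by omega)]
  | succ m ih =>
      intro r b
      rw [List.range_succ, List.foldl_append]
      simp only [List.foldl_cons, List.foldl_nil]
      rw [vt_getD_set, vt_row_len, ih]
      by_cases hb : b = m + 1
      · subst hb
        by_cases hlen : m + 1 < r.length
        · rw [if_pos ⟨rfl, hlen⟩, if_pos (by omega)]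
          norm_num
        · rw [if_neg (by tauto), if_neg (by omega), if_neg (by omega)]
      · rw [if_neg (by tauto)]
        have : (1 ≤ b ∧ b ≤ m ∧ b < r.length) ↔ (1 ≤ b ∧ b ≤ m + 1 ∧ b < r.length) := by omega
        rw [if_congr this rfl rfl]

-- one pass of the outer loop only rewrites row j+1
theorem vt_inner_len (t : List (List String)) (j : Nat) (l : List Nat) :
    ∀ acc : List (List String),
      (l.foldl (fun acc2 k =>
        acc2.set (j+1) ((acc2.getD (j+1) []).set (k+1) ((t.getD j []).getD k ""))) acc).length
      = acc.length := by
  induction l with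
  | nil => intro acc; rfl
  | cons x xs ih =>
      intro acc
      rw [List.foldl_cons, ih, List.length_set]

theorem vt_inner_getD (t : List (List String)) (j : Nat) (l : List Nat) :
    ∀ (acc : List (List String)) (a : Nat),
      ((l.foldl (fun acc2 k =>
          acc2.set (j+1) ((acc2.getD (j+1) []).set (k+1) ((t.getD j []).getD k ""))) acc).getD a [])
      = if a = j+1 ∧ j+1 < acc.length
        then l.foldl (fun r k => r.set (k+1) ((t.getD j []).getD k "")) (acc.getD (j+1) [])
        else acc.getD a [] := by
  induction l with
  | nil =>
      intro acc a
      rw [List.foldl_nil, List.foldl_nil]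
      by_cases h : a = j + 1 ∧ j + 1 < acc.length
      · rw [if_pos h, h.1]
      · rw [if_neg h]
  | cons x xs ih =>
      intro acc a
      rw [List.foldl_cons, ih, List.length_set]
      by_cases hr : j + 1 < acc.length
      · have hgd : (acc.set (j+1) ((acc.getD (j+1) []).set (x+1) ((t.getD j []).getD x ""))).getD (j+1) []
            = (acc.getD (j+1) []).set (x+1) ((t.getD j []).getD x "") := by
          rw [vt_getD_set, if_pos ⟨rfl, hr⟩]
        by_cases ha : a = j + 1
        · subst ha
          rw [if_pos ⟨rfl, hr⟩, if_pos ⟨rfl, hr⟩, hgd, List.foldl_cons]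
        · rw [if_neg (by tauto), if_neg (by tauto), vt_getD_set, if_neg (by tauto)]
      · have hset : acc.set (j+1) ((acc.getD (j+1) []).set (x+1) ((t.getD j []).getD x "")) = acc :=
          List.set_eq_of_length_le (by omega)
        rw [hset, if_neg (by tauto), if_neg (by tauto)]

theorem vt_outer_len (t : List (List String)) (l : List Nat) :
    ∀ acc : List (List String),
      (l.foldl (fun acc j =>
        (List.range t.length).foldl (fun acc2 k =>
          acc2.set (j+1) ((acc2.getD (j+1) []).set (k+1) ((t.getD j []).getD k ""))) acc) acc).length
      = acc.length := by
  induction l with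
  | nil => intro acc; rfl
  | cons x xs ih =>
      intro acc
      rw [List.foldl_cons, ih, vt_inner_len]

theorem vt_outer_getD (t : List (List String)) :
    ∀ (m : Nat), m ≤ t.length → ∀ (a : Nat),
      (((List.range m).foldl (fun acc j =>
          (List.range t.length).foldl (fun acc2 k =>
            acc2.set (j+1) ((acc2.getD (j+1) []).set (k+1) ((t.getD j []).getD k ""))) acc)
          (List.replicate (t.length+2) (List.replicate (t.length+2) "-"))).getD a [])
      = if 1 ≤ a ∧ a ≤ m
        then (List.range t.length).foldl (fun r k => r.set (k+1) ((t.getD (a-1) []).getD k ""))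
               (List.replicate (t.length+2) "-")
        else (List.replicate (t.length+2) (List.replicate (t.length+2) "-")).getD a [] := by
  intro m
  induction m with
  | zero =>
      intro _ a
      rw [List.range_zero, List.foldl_nil, if_neg (by omega)]
  | succ m ih =>
      intro hm a
      have hm' : m ≤ t.length := by omega
      rw [List.range_succ, List.foldl_append]
      simp only [List.foldl_cons, List.foldl_nil]
      rw [vt_inner_getD, vt_outer_len, List.length_replicate]
      by_cases ha : a = m + 1
      · subst ha
        have hlt : m + 1 < t.length + 2 := by omega
        rw [if_pos ⟨rfl, hlt⟩, ih hm', if_neg (by omega), if_pos (by omega)]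
        have hrep : (List.replicate (t.length+2) (List.replicate (t.length+2) "-")).getD (m+1) []
            = List.replicate (t.length+2) "-" := by
          simp [List.getD_eq_getElem?_getD, hlt]
        rw [hrep]
        norm_num
      · rw [if_neg (by tauto), ih hm',
            if_congr (show (1 ≤ a ∧ a ≤ m) ↔ (1 ≤ a ∧ a ≤ m + 1) by omega) rfl rfl]

-- the padded board of A, characterised
theorem vt_amp (t : List (List String)) (a b : Nat)
    (ha : a ≤ t.length + 1) (hb : b ≤ t.length + 1) :
    ((agrandar_tablero t).getD a []).getD b "" =
      if 1 ≤ a ∧ a ≤ t.length ∧ 1 ≤ b ∧ b ≤ t.length then vtGet t (a-1) (b-1) else "-" := by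
  have hexp : agrandar_tablero t
      = (List.range t.length).foldl (fun acc j =>
          (List.range t.length).foldl (fun acc2 k =>
            acc2.set (j+1) ((acc2.getD (j+1) []).set (k+1) ((t.getD j []).getD k ""))) acc)
          (List.replicate (t.length+2) (List.replicate (t.length+2) "-")) := rfl
  rw [hexp, vt_outer_getD t t.length le_rfl a]
  by_cases hA : 1 ≤ a ∧ a ≤ t.length
  · rw [if_pos hA, vt_row_getD, List.length_replicate]
    by_cases hB : 1 ≤ b ∧ b ≤ t.length
    · rw [if_pos ⟨hB.1, hB.2, by omega⟩, if_pos ⟨hA.1, hA.2, hB.1, hB.2⟩]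
      rfl
    · rw [if_neg (by tauto), if_neg (by tauto)]
      simp [List.getD_eq_getElem?_getD, (by omega : b < t.length + 2)]
  · rw [if_neg hA, if_neg (by tauto)]
    simp [List.getD_eq_getElem?_getD,
      (by omega : a < t.length + 2), (by omega : b < t.length + 2)]

set_option maxHeartbeats 1000000 in
theorem vtA_eq_spec (t : List (List String)) : verificar_tortugas t = vtSpec t := by
  unfold verificar_tortugas vtSpec
  simp only []
  apply PySem.List.foldl_congr_mem
  intro acc i hi
  apply PySem.List.foldl_congr_mem
  intro acc2 j hj
  rw [List.mem_range] at hi hj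
  have hup := vt_amp t i (j+1) (by omega) (by omega)
  have hleft := vt_amp t (i+1) j (by omega) (by omega)
  rw [hup, hleft]
  have e1 : (1 ≤ i ∧ i ≤ t.length ∧ 1 ≤ j + 1 ∧ j + 1 ≤ t.length) ↔ 0 < i := by omega
  have e2 : (1 ≤ i + 1 ∧ i + 1 ≤ t.length ∧ 1 ≤ j ∧ j ≤ t.length) ↔ 0 < j := by omega
  rw [if_congr e1 rfl rfl, if_congr e2 rfl rfl]
  simp only [vtBad, vtGet, Nat.add_sub_cancel]
  have h0i : decide (0 ≤ i) = true := by simp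
  have h0j : decide (0 ≤ j) = true := by simp
  have hin : decide (i ≤ t.length) = true := by simp; omega
  have hjn : decide (j ≤ t.length) = true := by simp; omega
  simp only [h0i, h0j, hin, hjn, Bool.and_true, if_true]
  by_cases hi0 : 0 < i <;> by_cases hj0 : 0 < j <;>
    simp only [hi0, hj0, if_pos, decide_true, decide_false, if_false] <;>
    cases hcell : ((t.getD i []).getD j "" == "T") <;>
    cases hup2 : ((t.getD (i-1) []).getD j "" == "T") <;>
    cases hleft2 : ((t.getD i []).getD (j-1) "" == "T") <;>
    simp_all

-- ===== B side: inclusion-exclusion =====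

-- the three pair predicates of B, with their boundary guards made explicit
def vtU (t : List (List String)) (i j : Nat) : Bool :=
  decide (0 < i) && ((vtGet t i j == "T") && (vtGet t (i-1) j == "T"))
def vtL (t : List (List String)) (i j : Nat) : Bool :=
  decide (0 < j) && ((vtGet t i j == "T") && (vtGet t i (j-1) == "T"))
def vtUL (t : List (List String)) (i j : Nat) : Bool :=
  decide (0 < i) && (decide (0 < j) &&
    ((vtGet t i j == "T") && (vtGet t (i-1) j == "T") && (vtGet t i (j-1) == "T")))

theorem vt_foldl_count {α : Type} (p : α → Bool) :
    ∀ (l : List α) (c : Int),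
      l.foldl (fun a x => if p x then a + 1 else a) c = c + (l.countP p : Int) := by
  intro l
  induction l with
  | nil => intro c; simp
  | cons x xs ih =>
      intro c
      rw [List.foldl_cons, List.countP_cons]
      by_cases h : p x = true <;> simp [h, ih] <;> push_cast <;> ring

theorem vt_nested_count (p : Nat → Nat → Bool) (l₂ : List Nat) :
    ∀ (l₁ : List Nat) (c : Int),
      l₁.foldl (fun acc i => l₂.foldl (fun a j => if p i j then a + 1 else a) acc) c
        = c + (((l₁.map fun i => l₂.countP (p i)).sum : Nat) : Int) := by
  intro l₁
  induction l₁ with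
  | nil => intro c; simp
  | cons x xs ih =>
      intro c
      rw [List.foldl_cons, vt_foldl_count, ih, List.map_cons, List.sum_cons]
      push_cast
      ring

theorem vt_countP_or_and {α : Type} (p q : α → Bool) (l : List α) :
    l.countP (fun x => p x || q x) + l.countP (fun x => p x && q x)
      = l.countP p + l.countP q := by
  induction l with
  | nil => rfl
  | cons x xs ih =>
      simp only [List.countP_cons]
      cases hp : p x <;> cases hq : q x <;> simp [hp, hq] <;> omega

theorem vt_countP_guard (p : Nat → Bool) (n : Nat) :
    (List.range n).countP (fun x => decide (0 < x) && p x)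
      = (List.range' 1 (n-1)).countP p := by
  cases n with
  | zero => rfl
  | succ m =>
      rw [List.range_eq_range', List.range'_succ, Nat.add_sub_cancel, List.countP_cons]
      have h0 : (decide (0 < 0) && p 0) = false := by simp
      rw [h0, if_neg (by simp), Nat.add_zero]
      apply List.countP_congr
      intro a ha
      have h1 : 1 ≤ a := (List.mem_range'_1.mp ha).1
      simp [Nat.lt_of_lt_of_le Nat.zero_lt_one h1]

theorem vt_sum_guard (f : Nat → Nat) (n : Nat) (h0 : f 0 = 0) :
    ((List.range n).map f).sum = ((List.range' 1 (n-1)).map f).sum := by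
  cases n with
  | zero => rfl
  | succ m =>
      rw [List.range_eq_range', List.range'_succ, Nat.add_sub_cancel,
          List.map_cons, List.sum_cons, h0, Nat.zero_add]

theorem vt_sum_add_eq (l : List Nat) (f g h k : Nat → Nat)
    (hx : ∀ i ∈ l, f i + g i = h i + k i) :
    (l.map f).sum + (l.map g).sum = (l.map h).sum + (l.map k).sum := by
  induction l with
  | nil => rfl
  | cons x xs ih =>
      simp only [List.map_cons, List.sum_cons]
      have h1 := hx x (List.mem_cons_self ..)
      have h2 := ih (fun i hi => hx i (List.mem_cons_of_mem _ hi))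
      omega

theorem vtBad_eq_or (t : List (List String)) (i j : Nat) :
    vtBad t i j = (vtU t i j || vtL t i j) := by
  unfold vtBad vtU vtL
  cases (decide (0 < i)) <;> cases (decide (0 < j)) <;>
    cases (vtGet t i j == "T") <;> cases (vtGet t (i-1) j == "T") <;>
    cases (vtGet t i (j-1) == "T") <;> rfl

theorem vtUL_eq_and (t : List (List String)) (i j : Nat) :
    (vtU t i j && vtL t i j) = vtUL t i j := by
  unfold vtU vtL vtUL
  cases (decide (0 < i)) <;> cases (decide (0 < j)) <;>
    cases (vtGet t i j == "T") <;> cases (vtGet t (i-1) j == "T") <;>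
    cases (vtGet t i (j-1) == "T") <;> rfl

theorem vtB_eq_spec (t : List (List String)) : verificar_tortugas_alt t = vtSpec t := by
  unfold verificar_tortugas_alt vtSpec
  simp only []
  rw [vt_nested_count (fun i j => ((t.getD i []).getD j "" == "T") && ((t.getD (i-1) []).getD j "" == "T")),
      vt_nested_count (fun i j => ((t.getD i []).getD j "" == "T") && ((t.getD i []).getD (j-1) "" == "T")),
      vt_nested_count (fun i j => ((t.getD i []).getD j "" == "T") && ((t.getD (i-1) []).getD j "" == "T")
        && ((t.getD i []).getD (j-1) "" == "T")),
      vt_nested_count (fun i j => vtBad t i j)]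
  -- vertical pairs
  have hvert : ((List.range t.length).map fun i => (List.range t.length).countP (vtU t i)).sum
      = ((List.range' 1 (t.length - 1)).map fun i =>
          (List.range t.length).countP (fun j =>
            ((t.getD i []).getD j "" == "T") && ((t.getD (i-1) []).getD j "" == "T"))).sum := by
    rw [vt_sum_guard _ _ (by
      apply List.countP_eq_zero.mpr
      intro j _
      simp [vtU])]
    apply congrArg List.sum
    apply List.map_congr_left
    intro i hi
    have h1 : 1 ≤ i := (List.mem_range'_1.mp hi).1
    apply List.countP_congr
    intro j _
    simp [vtU, vtGet, Nat.lt_of_lt_of_le Nat.zero_lt_one h1]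
  -- horizontal pairs
  have hhoriz : ((List.range t.length).map fun i => (List.range t.length).countP (vtL t i)).sum
      = ((List.range t.length).map fun i =>
          (List.range' 1 (t.length - 1)).countP (fun j =>
            ((t.getD i []).getD j "" == "T") && ((t.getD i []).getD (j-1) "" == "T"))).sum := by
    apply congrArg List.sum
    apply List.map_congr_left
    intro i _
    rw [← vt_countP_guard]
    apply List.countP_congr
    intro j _
    simp [vtL, vtGet]
  -- overlap
  have hboth : ((List.range t.length).map fun i => (List.range t.length).countP (vtUL t i)).sum
      = ((List.range' 1 (t.length - 1)).map fun i =>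
          (List.range' 1 (t.length - 1)).countP (fun j =>
            ((t.getD i []).getD j "" == "T") && ((t.getD (i-1) []).getD j "" == "T")
            && ((t.getD i []).getD (j-1) "" == "T"))).sum := by
    rw [vt_sum_guard _ _ (by
      apply List.countP_eq_zero.mpr
      intro j _
      simp [vtUL])]
    apply congrArg List.sum
    apply List.map_congr_left
    intro i hi
    have h1 : 1 ≤ i := (List.mem_range'_1.mp hi).1
    rw [← vt_countP_guard]
    apply List.countP_congr
    intro j _
    have hpos : 0 < i := Nat.lt_of_lt_of_le Nat.zero_lt_one h1
    simp [vtUL, vtGet, hpos, Bool.and_assoc]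
  -- inclusion-exclusion
  have hkey : ((List.range t.length).map fun i => (List.range t.length).countP (fun j => vtBad t i j)).sum
        + ((List.range t.length).map fun i => (List.range t.length).countP (vtUL t i)).sum
      = ((List.range t.length).map fun i => (List.range t.length).countP (vtU t i)).sum
        + ((List.range t.length).map fun i => (List.range t.length).countP (vtL t i)).sum := by
    apply vt_sum_add_eq
    intro i _
    have hb : (List.range t.length).countP (fun j => vtBad t i j)
        = (List.range t.length).countP (fun j => vtU t i j || vtL t i j) :=
      List.countP_congr (fun j _ => by rw [vtBad_eq_or t i j])
    have hc : (List.range t.length).countP (vtUL t i)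
        = (List.range t.length).countP (fun j => vtU t i j && vtL t i j) :=
      (List.countP_congr (fun j _ => by rw [vtUL_eq_and t i j])).symm
    rw [hb, hc, vt_countP_or_and]
  rw [← hvert, ← hhoriz, ← hboth]
  omega

-- ===== VERDICT (by name: the statement is the Claim_ definition above) =====
theorem verificar_tortugas_spec : Claim_equal_verificar_tortugas := by
  intro t _ _
  unfold Spec_verificar_tortugas
  rw [vtA_eq_spec, vtB_eq_spec]
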